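-- pv_equiv track=rewrite | github.com/vencil/Dynamic-Alerting-Integrations | scripts/tools/dx/check_aria_references.py | matches_any
-- ===== SOURCE A (Python) =====
-- def matches_any(ref_kind: str, ref_val: str, ids) -> bool:
--     for id_kind, id_val, _ in ids:
--         if ref_kind == "literal" and id_kind == "literal":
--             if ref_val == id_val:
--                 return True
--         elif ref_kind == "template-prefix":
--             if id_kind == "literal" and id_val.startswith(ref_val):
--                 return True
--             if id_kind == "template-prefix" and id_val == ref_val:
--                 return True
--         elif ref_kind == "literal" and id_kind == "template-prefix":
--             if ref_val.startswith(id_val):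
--                 return True
--     return False
-- ===== SOURCE B (Python) =====
-- def matches_any(ref_kind: str, ref_val: str, ids) -> bool:
--     # Build indices once: literal values and template-prefix values.
--     literals = []
--     prefixes = []
--     for id_kind, id_val, _ in ids:
--         if id_kind == "literal":
--             literals.append(id_val)
--         elif id_kind == "template-prefix":
--             prefixes.append(id_val)
--     # Dispatch on ref_kind against the grouped collections.
--     if ref_kind == "literal":
--         return ref_val in literals or any(ref_val.startswith(p) for p in prefixes)
--     if ref_kind == "template-prefix":
--         return any(l.startswith(ref_val) for l in literals) or ref_val in prefixes
--     return False
-- ===== Notes on version B (the rewrite author's own statement) =====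
-- stated objective: simpler
-- what changed: Replaces the single interleaved branching scan with a build-an-index-then-query structure: one pass partitions ids into literal values and template-prefix values, then one dispatch on ref_kind queries the two collections.
import Mathlib
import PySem

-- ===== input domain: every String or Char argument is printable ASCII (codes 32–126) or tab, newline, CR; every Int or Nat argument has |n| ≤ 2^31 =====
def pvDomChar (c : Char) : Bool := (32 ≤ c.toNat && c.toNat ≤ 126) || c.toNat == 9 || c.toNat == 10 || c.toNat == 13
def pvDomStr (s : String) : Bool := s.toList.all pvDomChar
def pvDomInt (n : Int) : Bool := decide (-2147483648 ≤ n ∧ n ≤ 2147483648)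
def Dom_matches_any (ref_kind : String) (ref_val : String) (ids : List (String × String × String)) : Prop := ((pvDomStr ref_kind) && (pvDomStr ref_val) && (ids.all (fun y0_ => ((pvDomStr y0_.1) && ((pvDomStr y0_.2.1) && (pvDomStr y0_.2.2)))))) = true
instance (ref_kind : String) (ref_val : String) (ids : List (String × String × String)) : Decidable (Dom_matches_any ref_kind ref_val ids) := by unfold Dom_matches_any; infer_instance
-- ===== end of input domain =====

set_option maxRecDepth 4096


-- B replaces A's single interleaved branching scan with build-two-indices-then-one-dispatch (objective: simpler).

-- ===== PORT A =====
-- Literal transliteration of A: one scan over ids with the branch cascade in A's order.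
def matches_any (ref_kind : String) (ref_val : String) (ids : List (String × String × String)) : Bool :=
  match ids with
  | [] => false
  | (id_kind, id_val, _) :: rest =>
    if ref_kind == "literal" && id_kind == "literal" then
      if ref_val == id_val then true else matches_any ref_kind ref_val rest
    else if ref_kind == "template-prefix" then
      if id_kind == "literal" && PySem.Str.startswith id_val ref_val then true
      else if id_kind == "template-prefix" && id_val == ref_val then true
      else matches_any ref_kind ref_val rest
    else if ref_kind == "literal" && id_kind == "template-prefix" then
      if PySem.Str.startswith ref_val id_val then true
      else matches_any ref_kind ref_val rest
    else matches_any ref_kind ref_val rest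

-- ===== PORT B =====
-- B's first pass: partition ids into (literal values, template-prefix values).
def maPartition (ids : List (String × String × String)) : List String × List String :=
  ids.foldl
    (fun acc t =>
      if t.1 == "literal" then (acc.1 ++ [t.2.1], acc.2)
      else if t.1 == "template-prefix" then (acc.1, acc.2 ++ [t.2.1])
      else acc)
    ([], [])

def matches_any_alt (ref_kind : String) (ref_val : String) (ids : List (String × String × String)) : Bool :=
  let p := maPartition ids
  if ref_kind == "literal" then
    p.1.contains ref_val || p.2.any (fun q => PySem.Str.startswith ref_val q)
  else if ref_kind == "template-prefix" then
    p.1.any (fun l => PySem.Str.startswith l ref_val) || p.2.contains ref_val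
  else false

-- ===== PRECONDITION & SPEC =====
def Spec_matches_any (ref_kind : String) (ref_val : String) (ids : List (String × String × String)) (out : Bool) : Prop := out = matches_any_alt ref_kind ref_val ids
instance (ref_kind : String) (ref_val : String) (ids : List (String × String × String)) (out : Bool) : Decidable (Spec_matches_any ref_kind ref_val ids out) := by unfold Spec_matches_any; infer_instance

-- ===== CLAIM (what is proved, stated in full; the proofs are below) =====
def Claim_equal_matches_any : Prop := ∀ (ref_kind : String) (ref_val : String) (ids : List (String × String × String)), Dom_matches_any ref_kind ref_val ids → Spec_matches_any ref_kind ref_val ids (matches_any ref_kind ref_val ids)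

-- ===== LEMMAS AND PROOFS =====

theorem maPartition_go (ids : List (String × String × String))
    (acc : List String × List String) :
    ids.foldl
      (fun acc t =>
        if t.1 == "literal" then (acc.1 ++ [t.2.1], acc.2)
        else if t.1 == "template-prefix" then (acc.1, acc.2 ++ [t.2.1])
        else acc) acc
    = (acc.1 ++ (maPartition ids).1, acc.2 ++ (maPartition ids).2) := by
  induction ids generalizing acc with
  | nil => simp [maPartition]
  | cons t rest ih =>
    rw [show maPartition (t :: rest)
        = (rest.foldl
            (fun acc t =>
              if t.1 == "literal" then (acc.1 ++ [t.2.1], acc.2)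
              else if t.1 == "template-prefix" then (acc.1, acc.2 ++ [t.2.1])
              else acc)
            (if t.1 == "literal" then (([] : List String) ++ [t.2.1], ([] : List String))
             else if t.1 == "template-prefix" then (([] : List String), ([] : List String) ++ [t.2.1])
             else (([] : List String), ([] : List String)))) from rfl]
    rw [List.foldl_cons, ih, ih]
    by_cases h1 : t.1 == "literal"
    · simp [h1]
    · by_cases h2 : t.1 == "template-prefix" <;> simp [h1, h2]

theorem maPartition_cons (t : String × String × String)
    (rest : List (String × String × String)) :
    maPartition (t :: rest)
    = if t.1 == "literal" then ((t.2.1 :: (maPartition rest).1), (maPartition rest).2)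
      else if t.1 == "template-prefix" then ((maPartition rest).1, t.2.1 :: (maPartition rest).2)
      else maPartition rest := by
  rw [show maPartition (t :: rest)
      = (rest.foldl
          (fun acc t =>
            if t.1 == "literal" then (acc.1 ++ [t.2.1], acc.2)
            else if t.1 == "template-prefix" then (acc.1, acc.2 ++ [t.2.1])
            else acc)
          (if t.1 == "literal" then (([] : List String) ++ [t.2.1], ([] : List String))
           else if t.1 == "template-prefix" then (([] : List String), ([] : List String) ++ [t.2.1])
           else (([] : List String), ([] : List String)))) from rfl]
  rw [maPartition_go]
  by_cases h1 : t.1 == "literal"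
  · simp [h1]
  · by_cases h2 : t.1 == "template-prefix" <;> simp [h1, h2]

theorem str_ne_lit_tp : ¬ (("literal" : String) = "template-prefix") := by decide

theorem alt_cons (ref_kind ref_val : String) (t : String × String × String)
    (rest : List (String × String × String)) :
    matches_any_alt ref_kind ref_val (t :: rest)
    = ((if ref_kind == "literal" then
          (t.1 == "literal" && ref_val == t.2.1)
          || (t.1 == "template-prefix" && PySem.Str.startswith ref_val t.2.1)
        else if ref_kind == "template-prefix" then
          (t.1 == "literal" && PySem.Str.startswith t.2.1 ref_val)
          || (t.1 == "template-prefix" && t.2.1 == ref_val)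
        else false)
        || matches_any_alt ref_kind ref_val rest) := by
  simp only [matches_any_alt, maPartition_cons]
  by_cases h1 : t.1 == "literal" <;> by_cases h2 : t.1 == "template-prefix"
  · exfalso
    simp only [beq_iff_eq] at h1 h2
    exact str_ne_lit_tp (h1 ▸ h2)
  all_goals
    by_cases hr1 : ref_kind == "literal" <;> by_cases hr2 : ref_kind == "template-prefix"
  all_goals
    first
    | (exfalso
       simp only [beq_iff_eq] at hr1 hr2
       exact str_ne_lit_tp (hr1 ▸ hr2))
    | simp [h1, h2, hr1, hr2, beq_eq_decide, eq_comm, Bool.or_assoc, Bool.or_left_comm]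

theorem ite_true_or (p b : Bool) : (if p = true then true else b) = (p || b) := by
  cases p <;> simp

theorem matches_any_eq_alt (ref_kind ref_val : String)
    (ids : List (String × String × String)) :
    matches_any ref_kind ref_val ids = matches_any_alt ref_kind ref_val ids := by
  induction ids with
  | nil =>
    by_cases hr1 : ref_kind == "literal" <;> by_cases hr2 : ref_kind == "template-prefix" <;>
      simp [matches_any, matches_any_alt, maPartition, hr1, hr2]
  | cons t rest ih =>
    obtain ⟨id_kind, id_val, extra⟩ := t
    rw [alt_cons]
    simp only [matches_any]
    by_cases h1 : id_kind == "literal" <;> by_cases h2 : id_kind == "template-prefix" <;>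
      by_cases hr1 : ref_kind == "literal" <;> by_cases hr2 : ref_kind == "template-prefix"
    all_goals
      first
      | (exfalso
         simp only [beq_iff_eq] at h1 h2
         exact str_ne_lit_tp (h1 ▸ h2))
      | (exfalso
         simp only [beq_iff_eq] at hr1 hr2
         exact str_ne_lit_tp (hr1 ▸ hr2))
      | (simp only [h1, h2, hr1, hr2, Bool.true_and, Bool.false_and, Bool.and_true,
          Bool.and_false, Bool.true_or, Bool.false_or, Bool.or_false, if_true, if_false, ih]
         first
         | rfl
         | simp [ite_true_or, beq_eq_decide])

-- ===== VERDICT (by name: the statement is the Claim_ definition above) =====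
theorem matches_any_spec : Claim_equal_matches_any := by
  intro ref_kind ref_val ids _
  exact matches_any_eq_alt ref_kind ref_val ids
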